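-- pv_equiv track=rewrite | github.com/acamposuribe/arquimedes | src/arquimedes/search.py | _build_relevance_summary
-- ===== SOURCE A (Python) =====
-- def _build_relevance_summary(csv: str) -> str:
--     """Turn a comma-separated relevance list into a counted summary like '2×high, 1×medium'."""
--     if not csv:
--         return ""
--     values = [v.strip() for v in csv.split(",") if v.strip()]
--     counts: dict[str, int] = {}
--     for v in values:
--         counts[v] = counts.get(v, 0) + 1
--     # Order by count descending, then alphabetically
--     ranked = sorted(counts.items(), key=lambda kv: (-kv[1], kv[0]))
--     if len(ranked) == 1 and ranked[0][1] == 1: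
--         return ranked[0][0]
--     return ", ".join(f"{c}×{r}" if c > 1 else r for r, c in ranked)
-- ===== SOURCE B (Python) =====
-- def _build_relevance_summary(csv: str) -> str:
--     """Bucket-by-count: count each distinct value directly, file it into a bucket
--     keyed by its count, then emit buckets from the highest count downwards
--     (each bucket already alphabetical) — no tuple-key sort of pairs at all."""
--     if not csv:
--         return ""
--     values = [v.strip() for v in csv.split(",") if v.strip()]
--     if not values:
--         return ""
--     buckets: dict[int, list[str]] = {}
--     for v in sorted(set(values)):
--         buckets.setdefault(values.count(v), []).append(v)
--     parts = []
--     for c in range(max(buckets), 0, -1):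
--         for v in buckets.get(c, []):
--             parts.append(f"{c}×{v}" if c > 1 else v)
--     return ", ".join(parts)
-- ===== Notes on version B (the rewrite author's own statement) =====
-- stated objective: alternative
-- what changed: Replaces the dict-of-counts plus sort-by-(-count,value) pipeline with bucket aggregation: each distinct value (taken in alphabetical order) is counted with list.count and filed into a bucket keyed by its count, and the output is emitted by walking the counts from max(buckets) down to 1, so no tuple-key sort of (value,count) pairs exists in B.
import Mathlib
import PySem

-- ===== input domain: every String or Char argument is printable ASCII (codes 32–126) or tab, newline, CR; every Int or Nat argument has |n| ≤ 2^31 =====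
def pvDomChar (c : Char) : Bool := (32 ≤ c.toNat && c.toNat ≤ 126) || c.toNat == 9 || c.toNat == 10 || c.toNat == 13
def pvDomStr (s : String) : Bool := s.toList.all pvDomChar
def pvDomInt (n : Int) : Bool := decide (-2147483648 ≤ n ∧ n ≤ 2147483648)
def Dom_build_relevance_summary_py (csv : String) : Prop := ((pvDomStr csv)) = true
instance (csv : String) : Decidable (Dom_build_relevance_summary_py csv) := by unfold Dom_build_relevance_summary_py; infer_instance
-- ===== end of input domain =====

-- B replaces A's dict-of-counts + sort-by-(-count, value) pipeline with bucket aggregation: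
-- each distinct value (in alphabetical order) is counted directly and filed into a bucket
-- keyed by its count, and the output walks the counts from max(buckets) down to 1 — no
-- tuple-key sort of (value, count) pairs exists in B; same output, alternative structure.

-- shared formatter: Python's  f"{c}×{r}" if c > 1 else r  (identical in A and B)
def pvFmt (rc : String × Int) : String := if rc.2 > 1 then PySem.Int.toStr rc.2 ++ "×" ++ rc.1 else rc.1

-- ===== PORT A =====
def build_relevance_summary_py (csv : String) : String :=
  if csv = "" then ""
  else
    -- [v.strip() for v in csv.split(",") if v.strip()]  (split? is some: sep "," ≠ "")
    let values := ((((PySem.Str.split? csv ",").getD []).filter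
        (fun v => PySem.Str.strip v ≠ "")).map PySem.Str.strip)
    -- for v in values: counts[v] = counts.get(v, 0) + 1
    let counts := values.foldl
        (fun (d : PySem.Dict String Int) v => d.insert v (d.getD v 0 + 1)) PySem.Dict.empty
    -- sorted(counts.items(), key=lambda kv: (-kv[1], kv[0]))  (lexicographic tuple key)
    let ranked := PySem.List.sorted counts.items
        (fun kv => toLex ((-kv.2 : Int), kv.1))
    if ranked.length = 1 ∧ (ranked.headD ("", 0)).2 = 1 then (ranked.headD ("", 0)).1
    else PySem.Str.join ", " (ranked.map pvFmt)

-- ===== PORT B =====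
def build_relevance_summary_py_alt (csv : String) : String :=
  if csv = "" then ""
  else
    let values := ((((PySem.Str.split? csv ",").getD []).filter
        (fun v => PySem.Str.strip v ≠ "")).map PySem.Str.strip)
    if values = [] then ""
    else
      -- for v in sorted(set(values)): buckets.setdefault(values.count(v), []).append(v)
      -- (setdefault(c, []).append(v) on a dict of lists ≡ insert c (getD c [] ++ [v]))
      let buckets := (PySem.List.sorted (PySem.Set.ofList values) (fun v => v)).foldl
        (fun (d : PySem.Dict Int (List String)) v =>
          d.insert ((values.count v : Int)) (d.getD ((values.count v : Int)) [] ++ [v]))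
        PySem.Dict.empty
      -- max(buckets): max over the keys (nonempty here; .getD 0 is the unreachable-none default)
      let mx := (PySem.List.max? buckets.keys (fun c => c)).getD 0
      -- for c in range(max(buckets), 0, -1): for v in buckets.get(c, []): parts.append(fmt)
      let parts := (PySem.List.pyRange mx 0 (-1)).flatMap
        (fun c => (buckets.getD c []).map (fun v => pvFmt (v, c)))
      PySem.Str.join ", " parts

-- ===== PRECONDITION & SPEC =====
def Spec_build_relevance_summary_py (csv : String) (out : String) : Prop := out = build_relevance_summary_py_alt csv
instance (csv : String) (out : String) : Decidable (Spec_build_relevance_summary_py csv out) := by unfold Spec_build_relevance_summary_py; infer_instance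

-- ===== CLAIM (what is proved, stated in full; the proofs are below) =====
def Claim_equal_build_relevance_summary_py : Prop := ∀ (csv : String), Dom_build_relevance_summary_py csv → Spec_build_relevance_summary_py csv (build_relevance_summary_py csv)

-- ===== LEMMAS AND PROOFS =====

-- B's bucket dict looked up at c is exactly the alphabetical distinct values whose count is c
theorem pv_getD_fold (vs : List String) (l : List String) (d : PySem.Dict Int (List String)) (c : Int) :
    (l.foldl (fun (d : PySem.Dict Int (List String)) v =>
        d.insert ((vs.count v : Int)) (d.getD ((vs.count v : Int)) [] ++ [v])) d).getD c []
      = d.getD c [] ++ l.filter (fun v => (vs.count v : Int) == c) := by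
  induction l generalizing d with
  | nil => simp
  | cons x xs ih =>
    simp only [List.foldl_cons, List.filter_cons, ih, PySem.Dict.getD_insert]
    by_cases hc : c = (vs.count x : Int)
    · simp [hc, List.append_assoc]
    · have : ¬ ((vs.count x : Int) == c) = true := by simpa using Ne.symm hc
      simp [hc, this]

-- partition: flatMapping filters over a Nodup index list that covers every f-value is a permutation
theorem pv_partition_perm {α : Type} (f : α → Int) (cs : List Int) (l : List α)
    (hnd : cs.Nodup) (hcov : ∀ v ∈ l, f v ∈ cs) :
    (cs.flatMap (fun c => l.filter (fun v => f v == c))).Perm l := by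
  induction cs generalizing l with
  | nil =>
    cases l with
    | nil => simp
    | cons x xs => exact absurd (hcov x (by simp)) (by simp)
  | cons c cs' ih =>
    rw [List.flatMap_cons]
    have hstep : cs'.flatMap (fun c' => l.filter (fun v => f v == c'))
        = cs'.flatMap (fun c' => (l.filter (fun v => f v != c)).filter (fun v => f v == c')) := by
      refine List.flatMap_congr (fun c' hc' => ?_)
      rw [List.filter_filter]
      refine (List.filter_congr (fun v _ => ?_)).symm
      by_cases h : f v = c'
      · have hne : f v ≠ c := fun hh => (List.nodup_cons.1 hnd).1 (hh ▸ h ▸ hc')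
        simp [h]
        exact fun hh => hne (h.trans hh)
      · simp [h]
    rw [hstep]
    have hperm := ih (l.filter (fun v => f v != c)) (List.nodup_cons.1 hnd).2
      (fun v hv => by
        have hm := List.mem_filter.1 hv
        have := hcov v hm.1
        rcases List.mem_cons.1 this with h | h
        · have hb : (f v != c) = true := hm.2
          simp [h] at hb
        · exact h)
    refine (hperm.append_left _).trans ?_
    have := List.filter_append_perm (fun v => f v == c) l
    simpa [bne] using this

-- countdown range is strictly decreasing and Nodup
theorem pv_pyRange_neg_one_pairwise_gt (a b : Int) :
    (PySem.List.pyRange a b (-1)).Pairwise (fun x y => y < x) := by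
  rw [PySem.List.pyRange_neg_one_eq_reverse, List.pairwise_reverse]
  exact PySem.List.pairwise_lt_pyRange_one _ _

theorem pv_pyRange_neg_one_nodup (a b : Int) : (PySem.List.pyRange a b (-1)).Nodup := by
  rw [PySem.List.pyRange_neg_one_eq_reverse, List.nodup_reverse]
  exact PySem.List.nodup_pyRange_one _ _

-- A's ranked list equals B's bucket-walk list of (value, count) pairs
theorem pv_ranked_eq (vs : List String) (mx : Int)
    (hmx : ∀ v ∈ vs, (vs.count v : Int) ≤ mx) :
    PySem.List.sorted (PySem.Dict.counter vs).items (fun kv => toLex ((-kv.2 : Int), kv.1))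
      = (PySem.List.pyRange mx 0 (-1)).flatMap
          (fun c => ((PySem.List.sorted (PySem.Set.ofList vs) (fun v => v)).filter
              (fun v => (vs.count v : Int) == c)).map (fun v => (v, c))) := by
  set dist := PySem.List.sorted (PySem.Set.ofList vs) (fun v => v) with hdist
  have hmemd : ∀ v ∈ dist, v ∈ vs := fun v hv =>
    (PySem.Set.mem_ofList vs v).1 ((PySem.List.mem_sorted _ _ _ v).1 hv)
  refine PySem.List.sorted_eq_of_perm_of_pairwise_lt _ _ _ ?_ ?_
  · -- permutation with counter items
    have h1 : ∀ c ∈ PySem.List.pyRange mx 0 (-1),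
        (dist.filter (fun v => (vs.count v : Int) == c)).map (fun v => (v, c))
          = (dist.filter (fun v => (vs.count v : Int) == c)).map (fun v => (v, (vs.count v : Int))) := by
      intro c _
      refine List.map_congr_left (fun v hv => ?_)
      have := (List.mem_filter.1 hv).2
      have : (vs.count v : Int) = c := by simpa using this
      rw [this]
    rw [List.flatMap_congr h1, ← List.map_flatMap]
    rw [PySem.Dict.items_counter]
    refine List.Perm.map _ ?_
    refine (pv_partition_perm (fun v => (vs.count v : Int)) _ dist
        (pv_pyRange_neg_one_nodup _ _) ?_).trans (PySem.List.sorted_perm _ _ _)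
    intro v hv
    rw [PySem.List.mem_pyRange_neg_one]
    refine ⟨?_, ?_⟩
    · show (0 : Int) < (vs.count v : Int)
      exact_mod_cast List.count_pos_iff.2 (hmemd v hv)
    · show (vs.count v : Int) ≤ mx
      exact hmx v (hmemd v hv)
  · -- strictly increasing in the key (-count, value)
    rw [List.pairwise_flatMap]
    constructor
    · intro c _
      rw [List.pairwise_map]
      refine List.Pairwise.imp ?_ ((PySem.List.sorted_ofList_pairwise_lt vs).filter _)
      intro a b hab
      exact Prod.Lex.toLex_lt_toLex.2 (Or.inr ⟨rfl, hab⟩)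
    · refine List.Pairwise.imp ?_ (pv_pyRange_neg_one_pairwise_gt mx 0)
      intro c1 c2 hgt x hx y hy
      rcases List.mem_map.1 hx with ⟨v1, _, rfl⟩
      rcases List.mem_map.1 hy with ⟨v2, _, rfl⟩
      exact Prod.Lex.toLex_lt_toLex.2 (Or.inl (by omega))

-- the whole non-empty branch, as a statement about the cleaned values
theorem pv_main (vs : List String) :
    (let counts := vs.foldl
        (fun (d : PySem.Dict String Int) v => d.insert v (d.getD v 0 + 1)) PySem.Dict.empty
     let ranked := PySem.List.sorted counts.items (fun kv => toLex ((-kv.2 : Int), kv.1))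
     if ranked.length = 1 ∧ (ranked.headD ("", 0)).2 = 1 then (ranked.headD ("", 0)).1
     else PySem.Str.join ", " (ranked.map pvFmt))
    = (if vs = [] then ""
       else
        let buckets := (PySem.List.sorted (PySem.Set.ofList vs) (fun v => v)).foldl
          (fun (d : PySem.Dict Int (List String)) v =>
            d.insert ((vs.count v : Int)) (d.getD ((vs.count v : Int)) [] ++ [v]))
          PySem.Dict.empty
        let mx := (PySem.List.max? buckets.keys (fun c => c)).getD 0
        let parts := (PySem.List.pyRange mx 0 (-1)).flatMap
          (fun c => (buckets.getD c []).map (fun v => pvFmt (v, c)))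
        PySem.Str.join ", " parts) := by
  by_cases hvs : vs = []
  · subst hvs; decide
  · rw [if_neg hvs]
    simp only [PySem.Dict.foldl_insert_getD_add_one_eq_counter]
    set dist := PySem.List.sorted (PySem.Set.ofList vs) (fun v => v) with hdistdef
    set buckets := dist.foldl
      (fun (d : PySem.Dict Int (List String)) v =>
        d.insert ((vs.count v : Int)) (d.getD ((vs.count v : Int)) [] ++ [v]))
      PySem.Dict.empty with hbdef
    have hmemd : ∀ v, v ∈ dist ↔ v ∈ vs := fun v =>
      (PySem.List.mem_sorted _ _ _ v).trans (PySem.Set.mem_ofList vs v)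
    -- keys of the bucket fold
    have hkeys : buckets.keys = PySem.Set.ofList (dist.map (fun v => (vs.count v : Int))) := by
      rw [hbdef, PySem.Dict.keys_foldl_insert_key]
      simp [PySem.Set.update_nil_left]
    -- buckets is over a nonempty dist, so keys ≠ [] and max? is some
    have hdne : dist ≠ [] := by
      rw [hdistdef, Ne, PySem.List.sorted_eq_nil_iff]
      intro hc
      obtain ⟨x, xs, rfl⟩ := List.exists_cons_of_ne_nil hvs
      have := (PySem.Set.mem_ofList (x::xs) x).2 (by simp)
      simp [hc] at this
    have hkne : buckets.keys ≠ [] := by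
      rw [hkeys]
      obtain ⟨x, xs, hx⟩ := List.exists_cons_of_ne_nil hdne
      intro hc
      have := (PySem.Set.mem_ofList (dist.map (fun v => (vs.count v : Int))) _).2
        (List.mem_map_of_mem (a := x) (by rw [hx]; simp))
      simp [hc] at this
    obtain ⟨m, hm⟩ : ∃ m, PySem.List.max? buckets.keys (fun c => c) = some m := by
      cases h : PySem.List.max? buckets.keys (fun c => c) with
      | none => exact absurd ((PySem.List.max?_eq_none_iff _ _).1 h) hkne
      | some m => exact ⟨m, rfl⟩
    have hmax : ∀ v ∈ vs, (vs.count v : Int) ≤ m := by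
      intro v hv
      refine PySem.List.max?_isMax hm _ ?_
      rw [hkeys, PySem.Set.mem_ofList]
      exact List.mem_map_of_mem ((hmemd v).2 hv)
    -- the bucket lookups are filters of dist
    have hgetD : ∀ c, buckets.getD c [] = dist.filter (fun v => (vs.count v : Int) == c) := by
      intro c
      rw [hbdef, pv_getD_fold]
      simp
    -- assemble
    have hranked := pv_ranked_eq vs m hmax
    rw [hm]
    simp only [Option.getD_some]
    have hparts : (PySem.List.pyRange m 0 (-1)).flatMap
        (fun c => (buckets.getD c []).map (fun v => pvFmt (v, c)))
        = ((PySem.List.pyRange m 0 (-1)).flatMap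
            (fun c => ((dist.filter (fun v => (vs.count v : Int) == c)).map
              (fun v => (v, c))))).map pvFmt := by
      rw [List.map_flatMap]
      refine List.flatMap_congr (fun c _ => ?_)
      rw [hgetD c, List.map_map]
      rfl
    rw [← hdistdef] at hranked
    rw [hparts, ← hranked]
    set ranked := PySem.List.sorted (PySem.Dict.counter vs).items
      (fun kv => toLex ((-kv.2 : Int), kv.1)) with hrdef
    split_ifs with hone
    · obtain ⟨h1, h2⟩ := hone
      obtain ⟨p, hp⟩ := List.length_eq_one_iff.1 h1
      rw [hp] at h2 ⊢
      simp only [List.headD_cons, List.map_cons, List.map_nil]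
      have h2' : p.2 = 1 := by simpa using h2
      have hfmt : pvFmt p = p.1 := by simp [pvFmt, h2']
      rw [hfmt]
      simp [PySem.Str.join, PySem.Chars.join, List.intercalate, String.ofList]
    · rfl

-- ===== VERDICT (by name: the statement is the Claim_ definition above) =====
theorem build_relevance_summary_py_spec : Claim_equal_build_relevance_summary_py := by
  intro csv _
  unfold Spec_build_relevance_summary_py build_relevance_summary_py build_relevance_summary_py_alt
  by_cases h : csv = ""
  · rw [if_pos h, if_pos h]
  · rw [if_neg h, if_neg h]
    exact pv_main _
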